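-- pv_equiv track=rewrite | github.com/hungaborhorvath/advent_of_code | 2025/01/aoc_2501.py | dial_states
-- ===== SOURCE A (Python) =====
-- START = 50
--
-- DIAL_SIZE = 100
--
-- def dial_states(numbers:list[int], start:int =START,
--                                    dial_size:int =DIAL_SIZE) -> list[int]:
--     dial = start
--     dial_sequence = [dial]
--     for n in numbers:
--         dial = (dial + n) % dial_size
--         dial_sequence.append(dial)
--     return dial_sequence
-- ===== SOURCE B (Python) =====
-- START = 50
--
-- DIAL_SIZE = 100
--
-- def dial_states(numbers: list[int], start: int = START,
--                                     dial_size: int = DIAL_SIZE) -> list[int]: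
--     # Build the sequence BACK-TO-FRONT: jump to the final raw sum first, then
--     # walk the deltas in reverse, subtracting each, emitting the reduced
--     # states into a reversed buffer; the raw start goes in last, then reverse.
--     s = start + sum(numbers)
--     rev = []
--     for n in reversed(numbers):
--         rev.append(s % dial_size)
--         s -= n
--     rev.append(start)
--     rev.reverse()
--     return rev
-- ===== Notes on version B (the rewrite author's own statement) =====
-- stated objective: alternative
-- what changed: B builds the sequence back-to-front: it jumps to the final raw sum with one sum() call, then walks the deltas in reverse order subtracting each, emits the reduced states into a reversed buffer and reverses it at the end, instead of A's forward loop carrying a step-by-step reduced modular state.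
import Mathlib
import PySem

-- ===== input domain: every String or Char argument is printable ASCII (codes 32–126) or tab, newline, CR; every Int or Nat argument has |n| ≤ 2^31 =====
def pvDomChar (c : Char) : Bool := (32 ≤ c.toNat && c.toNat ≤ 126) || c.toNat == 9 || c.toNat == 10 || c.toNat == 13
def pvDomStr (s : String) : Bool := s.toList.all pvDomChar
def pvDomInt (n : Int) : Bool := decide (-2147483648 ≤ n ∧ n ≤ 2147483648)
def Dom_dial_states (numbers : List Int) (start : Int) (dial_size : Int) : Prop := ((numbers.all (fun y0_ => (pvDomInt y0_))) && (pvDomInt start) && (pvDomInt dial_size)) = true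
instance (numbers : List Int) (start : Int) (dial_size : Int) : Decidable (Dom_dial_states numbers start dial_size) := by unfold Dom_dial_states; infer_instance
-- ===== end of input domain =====

-- B builds the sequence back-to-front: it jumps to the final raw sum, walks the deltas in
-- reverse subtracting each, and reverses the buffer at the end (alternative decomposition).

-- ===== PORT A =====
-- A's forward loop: carry the reduced dial and the growing output list.
def dialLoopA (numbers : List Int) (dial : Int) (seq : List Int) (dial_size : Int) : List Int :=
  match numbers with
  | [] => seq
  | n :: ns =>
    let dial' := PySem.Int.mod (dial + n) dial_size
    dialLoopA ns dial' (seq ++ [dial']) dial_size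

def dial_states (numbers : List Int) (start : Int) (dial_size : Int) : List Int :=
  dialLoopA numbers start [start] dial_size

-- ===== PORT B =====
-- Source B's backward loop: for n in reversed(numbers): rev.append(s % dial_size); s -= n
def dialBackLoop (ns : List Int) (s : Int) (rev : List Int) (d : Int) : List Int :=
  match ns with
  | [] => rev
  | n :: t => dialBackLoop t (s - n) (rev ++ [PySem.Int.mod s d]) d

def dial_states_alt (numbers : List Int) (start : Int) (dial_size : Int) : List Int :=
  let s := start + numbers.foldl (· + ·) 0      -- start + sum(numbers)
  let rev := dialBackLoop numbers.reverse s [] dial_size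
  (rev ++ [start]).reverse

-- ===== PRECONDITION & SPEC =====
-- Pre_ excludes dial_size = 0 with nonempty numbers: Python's '%' raises ZeroDivisionError there (in A and B alike).
def Pre_dial_states (numbers : List Int) (start : Int) (dial_size : Int) : Prop :=
  numbers = [] ∨ dial_size ≠ 0
instance (numbers : List Int) (start : Int) (dial_size : Int) : Decidable (Pre_dial_states numbers start dial_size) := by unfold Pre_dial_states; infer_instance
def pvWitness_dial_states : List Int × Int × Int := ([3, -5, 7], 50, 100)

def Spec_dial_states (numbers : List Int) (start : Int) (dial_size : Int) (out : List Int) : Prop := out = dial_states_alt numbers start dial_size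
instance (numbers : List Int) (start : Int) (dial_size : Int) (out : List Int) : Decidable (Spec_dial_states numbers start dial_size out) := by unfold Spec_dial_states; infer_instance

-- ===== CLAIM (what is proved, stated in full; the proofs are below) =====
def Claim_equal_dial_states : Prop := ∀ (numbers : List Int) (start : Int) (dial_size : Int), Dom_dial_states numbers start dial_size → Pre_dial_states numbers start dial_size → Spec_dial_states numbers start dial_size (dial_states numbers start dial_size)

-- ===== LEMMAS AND PROOFS =====

-- Specification ladder: the raw prefix sums s+n1, s+n1+n2, …
def prefixSums (total : Int) (numbers : List Int) : List Int :=
  match numbers with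
  | [] => []
  | n :: ns => (total + n) :: prefixSums (total + n) ns

-- B's backward ladder: fmod s d, fmod (s-n1) d, … walking the reversed deltas.
def gStates (d : Int) (ns : List Int) (s : Int) : List Int :=
  match ns with
  | [] => []
  | n :: t => Int.fmod s d :: gStates d t (s - n)

-- Python's % (fmod) only depends on the summand's residue; holds for every dial_size, including 0.
theorem fmod_add_congr (a b n d : Int) (h : Int.fmod a d = Int.fmod b d) :
    Int.fmod (a + n) d = Int.fmod (b + n) d := by
  have ha := Int.fmod_def a d
  have hb := Int.fmod_def b d
  have key : a + n = (b + n) + d * (a.fdiv d - b.fdiv d) := by linear_combination hb - ha + h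
  rw [key, Int.add_mul_fmod_self_left]

theorem fmod_fmod_self (a d : Int) : Int.fmod (Int.fmod a d) d = Int.fmod a d := by
  conv_lhs => rw [Int.fmod_def a d]
  rw [show a - d * a.fdiv d = a + d * (-(a.fdiv d)) by ring, Int.add_mul_fmod_self_left]

-- A's loop produces, after the accumulator, exactly the reduced raw prefix sums.
theorem dialLoopA_eq (numbers : List Int) :
    ∀ (a b : Int) (seq : List Int) (d : Int), Int.fmod a d = Int.fmod b d →
      dialLoopA numbers a seq d = seq ++ (prefixSums b numbers).map (fun s => Int.fmod s d) := by
  induction numbers with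
  | nil => intro a b seq d _; simp [dialLoopA, prefixSums]
  | cons n ns ih =>
    intro a b seq d h
    have hstep : Int.fmod (a + n) d = Int.fmod (b + n) d := fmod_add_congr a b n d h
    have hnext : Int.fmod (Int.fmod (a + n) d) d = Int.fmod (b + n) d := by
      rw [fmod_fmod_self, hstep]
    simp only [dialLoopA, prefixSums, List.map_cons, PySem.Int.mod]
    rw [ih (Int.fmod (a + n) d) (b + n) _ d hnext, hstep]
    simp

-- B's loop is its ladder after the accumulator.
theorem dialBackLoop_eq (ns : List Int) :
    ∀ (s : Int) (rev : List Int) (d : Int),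
      dialBackLoop ns s rev d = rev ++ gStates d ns s := by
  induction ns with
  | nil => intro s rev d; simp [dialBackLoop, gStates]
  | cons n t ih =>
    intro s rev d
    simp only [dialBackLoop, gStates, PySem.Int.mod]
    rw [ih]
    simp

theorem foldl_add_shift (ns : List Int) : ∀ (a : Int), ns.foldl (· + ·) a = a + ns.foldl (· + ·) 0 := by
  induction ns with
  | nil => intro a; simp
  | cons n t ih => intro a; simp only [List.foldl_cons]; rw [ih (a + n), ih (0 + n)]; ring

theorem foldl_eq_sum (ns : List Int) : ns.foldl (· + ·) 0 = ns.sum := by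
  induction ns with
  | nil => simp
  | cons n t ih => simp only [List.foldl_cons, List.sum_cons]; rw [foldl_add_shift, ih]; ring

theorem gStates_append (d : Int) (xs : List Int) :
    ∀ (ys : List Int) (s : Int),
      gStates d (xs ++ ys) s = gStates d xs s ++ gStates d ys (s - xs.sum) := by
  induction xs with
  | nil => intro ys s; simp [gStates]
  | cons x t ih =>
    intro ys s
    simp only [List.cons_append, gStates, List.sum_cons]
    rw [ih ys (s - x)]
    have h : s - x - t.sum = s - (x + t.sum) := by ring
    rw [h]

-- Walking the reversed deltas backwards from the final raw sum yields the reversed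
-- reduced prefix sums.
theorem gStates_reverse (d : Int) (numbers : List Int) :
    ∀ (s : Int),
      gStates d numbers.reverse (s + numbers.sum)
        = ((prefixSums s numbers).map (fun x => Int.fmod x d)).reverse := by
  induction numbers with
  | nil => intro s; simp [gStates, prefixSums]
  | cons n ns ih =>
    intro s
    simp only [List.reverse_cons, List.sum_cons]
    rw [gStates_append d ns.reverse [n] (s + (n + ns.sum))]
    have h1 : s + (n + ns.sum) = (s + n) + ns.sum := by ring
    rw [h1, ih (s + n)]
    have h2 : s + n + ns.sum - ns.reverse.sum = s + n := by
      rw [List.sum_reverse]; ring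
    rw [h2]
    simp [gStates, prefixSums]

-- ===== VERDICT (by name: the statement is the Claim_ definition above) =====
theorem dial_states_spec : Claim_equal_dial_states := by
  intro numbers start dial_size _ _
  unfold Spec_dial_states dial_states dial_states_alt
  rw [dialLoopA_eq numbers start start [start] dial_size rfl]
  simp only []
  rw [dialBackLoop_eq, foldl_eq_sum, gStates_reverse dial_size numbers start]
  simp
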